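-- pv_equiv track=rewrite | github.com/icemanaf/AOC2023 | Day01/impl.py | get_first_and_last_number_index
-- ===== SOURCE A (Python) =====
-- def get_first_and_last_number_index(s):
--     stack=[]
--     index=0
--     for c in s:
--         asciiVal=ord(c)
--         if (asciiVal>=48 and asciiVal<=57):
--             stack.append((c,index))
--         index=index+1
--     if len(stack)>0:
--         return (stack[0],stack.pop())
--     else:
--         return (('0',len(s)),('0',0))
-- ===== SOURCE B (Python) =====
-- def get_first_and_last_number_index(s):
--     first = None
--     for i, c in enumerate(s):
--         if 48 <= ord(c) <= 57:
--             first = (c, i)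
--             break
--     if first is None:
--         return (('0', len(s)), ('0', 0))
--     for i in range(len(s) - 1, -1, -1):
--         c = s[i]
--         if 48 <= ord(c) <= 57:
--             return (first, (c, i))
-- ===== Notes on version B (the rewrite author's own statement) =====
-- stated objective: alternative
-- what changed: Instead of collecting every digit with its index into a stack in one full pass and taking that list's first and last elements, B makes two early-exit scans: forward to the first digit and backward from the end to the last digit, keeping no list; it trades the single list-building pass for two bounded scans at the same overall cost.
import Mathlib
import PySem

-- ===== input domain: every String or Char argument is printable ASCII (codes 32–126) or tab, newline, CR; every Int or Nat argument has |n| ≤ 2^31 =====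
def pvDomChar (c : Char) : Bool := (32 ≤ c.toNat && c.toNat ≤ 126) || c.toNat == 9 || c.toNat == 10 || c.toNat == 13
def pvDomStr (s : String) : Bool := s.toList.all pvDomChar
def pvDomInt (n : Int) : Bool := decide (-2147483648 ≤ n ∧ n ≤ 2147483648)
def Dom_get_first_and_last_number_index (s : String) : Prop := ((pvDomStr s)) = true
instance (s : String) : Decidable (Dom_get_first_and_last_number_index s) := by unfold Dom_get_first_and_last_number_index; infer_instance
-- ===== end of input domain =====

-- B replaces A's full pass that stacks every digit by two early-exit scans (forward for the
-- first digit, backward for the last); return values agree on every input.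

-- ===== PORT A =====
-- A's loop: walk the string, pushing (c, index) for every ASCII digit onto `stack`.
def pvAStack : List Char → Int → List (String × Int) → List (String × Int)
  | [], _, st => st
  | c :: rest, i, st =>
      pvAStack rest (i + 1) (if 48 ≤ c.toNat ∧ c.toNat ≤ 57 then st ++ [(String.ofList [c], i)] else st)

def get_first_and_last_number_index (s : String) : (String × Int) × (String × Int) :=
  match pvAStack s.toList 0 [] with
  | [] => (("0", (s.toList.length : Int)), ("0", 0))
  | x :: rest => (x, (x :: rest).getLast (by simp))   -- stack[0] and stack.pop()

-- ===== PORT B =====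
-- first loop of B: forward scan, stop at the first ASCII digit
def pvFindFirst : List Char → Int → Option (String × Int)
  | [], _ => none
  | c :: rest, i =>
      if 48 ≤ c.toNat ∧ c.toNat ≤ 57 then some (String.ofList [c], i) else pvFindFirst rest (i + 1)

-- second loop of B: backward scan; receives the reversed character list and the index of its head
def pvFindLast : List Char → Int → Option (String × Int)
  | [], _ => none
  | c :: rest, i =>
      if 48 ≤ c.toNat ∧ c.toNat ≤ 57 then some (String.ofList [c], i) else pvFindLast rest (i - 1)

def get_first_and_last_number_index_alt (s : String) : (String × Int) × (String × Int) :=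
  match pvFindFirst s.toList 0 with
  | none => (("0", (s.toList.length : Int)), ("0", 0))
  | some f =>
      -- the backward loop must find a digit too (a digit exists); `getD` covers the unreachable none
      (f, (pvFindLast s.toList.reverse ((s.toList.length : Int) - 1)).getD ("0", 0))

-- ===== PRECONDITION & SPEC =====
def Spec_get_first_and_last_number_index (s : String) (out : (String × Int) × (String × Int)) : Prop := out = get_first_and_last_number_index_alt s
instance (s : String) (out : (String × Int) × (String × Int)) : Decidable (Spec_get_first_and_last_number_index s out) := by unfold Spec_get_first_and_last_number_index; infer_instance

-- ===== CLAIM (what is proved, stated in full; the proofs are below) =====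
def Claim_equal_get_first_and_last_number_index : Prop := ∀ (s : String), Dom_get_first_and_last_number_index s → Spec_get_first_and_last_number_index s (get_first_and_last_number_index s)

-- ===== LEMMAS AND PROOFS =====

-- the digits of l (as 1-char strings) paired with their indices, starting at index i
def pvDigits : List Char → Int → List (String × Int)
  | [], _ => []
  | c :: rest, i =>
      (if 48 ≤ c.toNat ∧ c.toNat ≤ 57 then [(String.ofList [c], i)] else []) ++ pvDigits rest (i + 1)

theorem pvAStack_eq (l : List Char) : ∀ (i : Int) (st : List (String × Int)),
    pvAStack l i st = st ++ pvDigits l i := by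
  induction l with
  | nil => simp [pvAStack, pvDigits]
  | cons c rest ih =>
      intro i st
      simp only [pvAStack, pvDigits, ih]
      split <;> simp

theorem pvFindFirst_eq (l : List Char) : ∀ (i : Int),
    pvFindFirst l i = (pvDigits l i).head? := by
  induction l with
  | nil => simp [pvFindFirst, pvDigits]
  | cons c rest ih =>
      intro i
      simp only [pvFindFirst, pvDigits]
      split <;> simp [ih]

theorem pvDigits_append (l : List Char) (c : Char) : ∀ (i : Int),
    pvDigits (l ++ [c]) i
      = pvDigits l i ++ (if 48 ≤ c.toNat ∧ c.toNat ≤ 57 then [(String.ofList [c], i + l.length)] else []) := by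
  induction l with
  | nil => intro i; simp [pvDigits]
  | cons d rest ih =>
      intro i
      simp only [List.cons_append, pvDigits, ih]
      have : i + 1 + (rest.length : Int) = i + ((rest.length : Int) + 1) := by ring
      simp [this, List.append_assoc]

theorem pvFindLast_eq (l : List Char) : ∀ (i : Int),
    pvFindLast l.reverse (i + l.length - 1) = (pvDigits l i).getLast? := by
  induction l using List.reverseRecOn with
  | nil => simp [pvFindLast, pvDigits]
  | append_singleton l c ih =>
      intro i
      have hidx : i + ((l ++ [c]).length : Int) - 1 = i + l.length := by
        simp; ring
      rw [hidx, List.reverse_append]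
      simp only [List.reverse_singleton, List.singleton_append, pvFindLast, pvDigits_append]
      split
      · simp
      · have : i + (l.length : Int) - 1 = i + l.length - 1 := rfl
        simp [ih i]

theorem get_first_and_last_eq (s : String) :
    get_first_and_last_number_index s = get_first_and_last_number_index_alt s := by
  unfold get_first_and_last_number_index get_first_and_last_number_index_alt
  rw [pvAStack_eq, pvFindFirst_eq]
  have hlast := pvFindLast_eq s.toList 0
  rw [show (0 : Int) + s.toList.length - 1 = (s.toList.length : Int) - 1 by ring] at hlast
  rw [hlast]
  cases h : pvDigits s.toList 0 with
  | nil => simp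
  | cons x rest =>
      simp only [List.nil_append, List.head?_cons]
      rw [List.getLast?_eq_some_getLast (l := x :: rest) (by simp)]
      simp

-- ===== VERDICT (by name: the statement is the Claim_ definition above) =====
theorem get_first_and_last_number_index_spec : Claim_equal_get_first_and_last_number_index := by
  intro s _
  exact get_first_and_last_eq s
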